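-- pv_equiv track=rewrite | github.com/hoangthuytruc/Orange | 04_DivideAndConquer/07_TreeSumming.py | count_bracket
-- ===== SOURCE A (Python) =====
-- def count_bracket(st):
--     brackets = 0
--     for c in st:
--         if c == '(':
--             brackets += 1
--         elif c == ')':
--             brackets -= 1
--     return brackets
-- ===== SOURCE B (Python) =====
-- def count_bracket(st):
--     # Divide and conquer: the net bracket count is additive over concatenation,
--     # so split the string in half, recurse on both halves, and add.
--     n = len(st)
--     if n == 0:
--         return 0
--     if n == 1:
--         return 1 if st == '(' else (-1 if st == ')' else 0)
--     mid = n // 2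
--     return count_bracket(st[:mid]) + count_bracket(st[mid:])
-- ===== Notes on version B (the rewrite author's own statement) =====
-- stated objective: alternative
-- what changed: Replaces the single-pass running-balance loop with a divide-and-conquer recursion that splits the string in half, recurses on both halves, and adds the two balances (correct because the balance is additive over concatenation).
import Mathlib
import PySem

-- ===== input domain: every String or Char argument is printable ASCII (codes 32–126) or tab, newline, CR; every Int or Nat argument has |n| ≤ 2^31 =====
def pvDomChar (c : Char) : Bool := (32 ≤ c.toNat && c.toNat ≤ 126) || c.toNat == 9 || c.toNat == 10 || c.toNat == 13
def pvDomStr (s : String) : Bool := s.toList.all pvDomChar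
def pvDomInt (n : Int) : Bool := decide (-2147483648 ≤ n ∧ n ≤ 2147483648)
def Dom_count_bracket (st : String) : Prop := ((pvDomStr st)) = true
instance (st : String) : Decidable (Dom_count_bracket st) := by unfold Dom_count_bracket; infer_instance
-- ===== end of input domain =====

-- B replaces A's single running-balance loop with a divide-and-conquer recursion over string halves (alternative decomposition; same result).


-- ===== PORT A =====
-- one pass over the string keeping a running balance
def count_bracket (st : String) : Int :=
  st.toList.foldl (fun brackets c =>
    if c = '(' then brackets + 1
    else if c = ')' then brackets - 1
    else brackets) 0

-- ===== PORT B =====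
-- divide and conquer on the character list; the slices st[:mid] / st[mid:]
-- (0 ≤ mid ≤ len, so Python slicing = take/drop, exact here). Structural
-- recursion on a fuel = length bound (fuel only makes the recursion total;
-- it never runs out, see cbGo_eq_counts).
def cbGo : Nat → List Char → Int
  | 0, _ => 0
  | fuel + 1, l =>
    let n := l.length
    if n = 0 then 0
    else if n = 1 then (if l = ['('] then 1 else if l = [')'] then -1 else 0)
    else
      let mid := n / 2
      cbGo fuel (l.take mid) + cbGo fuel (l.drop mid)

def count_bracket_alt (st : String) : Int := cbGo st.toList.length st.toList

-- ===== PRECONDITION & SPEC =====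
def Spec_count_bracket (st : String) (out : Int) : Prop := out = count_bracket_alt st
instance (st : String) (out : Int) : Decidable (Spec_count_bracket st out) := by unfold Spec_count_bracket; infer_instance

-- ===== CLAIM (what is proved, stated in full; the proofs are below) =====
def Claim_equal_count_bracket : Prop := ∀ (st : String), Dom_count_bracket st → Spec_count_bracket st (count_bracket st)

-- ===== LEMMAS AND PROOFS =====

-- Both programs compute (#'(') − (#')'); first, B's recursion (with enough fuel).
theorem cbGo_eq_counts (fuel : Nat) (l : List Char) (hf : l.length ≤ fuel) :
    cbGo fuel l = (l.count '(' : Int) - (l.count ')' : Int) := by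
  induction fuel generalizing l with
  | zero => simp_all [List.length_eq_zero_iff, cbGo]
  | succ fuel ih =>
    rw [cbGo]
    by_cases h0 : l.length = 0
    · simp_all [List.length_eq_zero_iff]
    by_cases h1 : l.length = 1
    · simp only [h1, reduceIte]
      obtain ⟨c, rfl⟩ := List.length_eq_one_iff.mp h1
      by_cases hc1 : c = '('
      · simp [hc1]
      · by_cases hc2 : c = ')'
        · simp [hc2]
        · simp [hc1, hc2]
    · simp only [if_neg h0, if_neg h1]
      rw [ih (l.take (l.length / 2)) (by simp; omega),
          ih (l.drop (l.length / 2)) (by simp; omega)]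
      have h : ∀ c : Char, (l.take (l.length / 2)).count c + (l.drop (l.length / 2)).count c
          = l.count c := by
        intro c
        conv_rhs => rw [← List.take_append_drop (l.length / 2) l]
        rw [List.count_append]
      have h1 := h '('
      have h2 := h ')'
      push_cast [← h1, ← h2]
      ring

-- A's three-way branch as a fold equals (#'(') − (#')').
theorem foldl_balance (l : List Char) (a : Int) :
    l.foldl (fun brackets c =>
      if c = '(' then brackets + 1
      else if c = ')' then brackets - 1
      else brackets) a = a + (l.count '(' : Int) - (l.count ')' : Int) := by
  induction l generalizing a with
  | nil => simp
  | cons x t ih =>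
    simp only [List.foldl_cons, List.count_cons, ih]
    by_cases h1 : x = '('
    · simp [h1]; ring
    · by_cases h2 : x = ')'
      · simp [h2]; ring
      · simp [h1, h2]

-- ===== VERDICT (by name: the statement is the Claim_ definition above) =====
theorem count_bracket_spec : Claim_equal_count_bracket := by
  intro st _
  unfold Spec_count_bracket count_bracket count_bracket_alt
  rw [foldl_balance, cbGo_eq_counts _ _ le_rfl]
  ring
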